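-- pv_equiv track=rewrite | github.com/Arescoreadmin/frostgate-spear | src/planner/__init__.py | _apply_persona_preferences
-- ===== SOURCE A (Python) =====
-- from typing import Any, Dict, List, Optional, TYPE_CHECKING
--
-- def _apply_persona_preferences(
--
--     techniques: List[str],
--     persona: Dict[str, Any],
--     phase_type: str,
-- ) -> List[str]:
--     """Apply persona preferences to technique selection."""
--     if not persona:
--         return techniques
--
--     ttps = persona.get("ttps", {})
--     kill_chain_prefs = ttps.get("kill_chain_preferences", {})
--     phase_prefs = kill_chain_prefs.get(phase_type, {})
--     preferred_techniques = phase_prefs.get("technique_preferences", [])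
--
--     if preferred_techniques:
--         # Prioritize persona's preferred techniques
--         preferred = [t for t in techniques if t in preferred_techniques]
--         others = [t for t in techniques if t not in preferred_techniques]
--         return preferred + others
--
--     return techniques
-- ===== SOURCE B (Python) =====
-- from typing import Any, Dict, List
--
-- def _apply_persona_preferences(
--     techniques: List[str],
--     persona: Dict[str, Any],
--     phase_type: str,
-- ) -> List[str]:
--     """Apply persona preferences to technique selection."""
--     try:
--         prefs = set(
--             persona["ttps"]["kill_chain_preferences"][phase_type]["technique_preferences"]
--         )
--     except KeyError:
--         return techniques
--     if not prefs:
--         return techniques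
--     # Stable sort: preferred techniques (key False) first, both groups in original order.
--     return sorted(techniques, key=lambda t: t not in prefs)
-- ===== Notes on version B (the rewrite author's own statement) =====
-- stated objective: idiomatic
-- what changed: Replaces the chain of .get defaults plus two membership-filter comprehensions with direct indexing under try/except KeyError, a set for O(1) membership, and a single stable sort keyed on non-membership (stability keeps both groups in original order).
import Mathlib
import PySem

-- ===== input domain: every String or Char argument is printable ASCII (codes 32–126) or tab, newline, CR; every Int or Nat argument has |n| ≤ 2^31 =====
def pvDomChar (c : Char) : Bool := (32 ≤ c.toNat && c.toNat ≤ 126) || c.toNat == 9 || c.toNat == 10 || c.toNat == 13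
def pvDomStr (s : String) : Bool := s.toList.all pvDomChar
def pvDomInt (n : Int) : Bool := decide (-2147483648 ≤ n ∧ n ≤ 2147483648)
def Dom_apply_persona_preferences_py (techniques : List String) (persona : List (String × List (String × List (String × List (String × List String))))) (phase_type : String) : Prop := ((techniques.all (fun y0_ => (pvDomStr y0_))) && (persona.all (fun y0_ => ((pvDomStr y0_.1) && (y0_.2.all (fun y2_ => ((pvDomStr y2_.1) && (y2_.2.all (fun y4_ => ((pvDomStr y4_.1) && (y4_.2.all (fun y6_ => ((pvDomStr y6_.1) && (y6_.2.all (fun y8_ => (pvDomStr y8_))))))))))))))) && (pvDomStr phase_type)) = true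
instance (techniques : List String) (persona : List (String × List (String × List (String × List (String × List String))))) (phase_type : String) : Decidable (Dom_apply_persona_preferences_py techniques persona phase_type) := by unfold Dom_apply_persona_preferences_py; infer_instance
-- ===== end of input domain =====

-- B fetches the preference list by direct indexing (KeyError → unchanged), builds a set, and does one
-- stable sort keyed on non-membership instead of A's default-chaining .get's and two filter passes (idiomatic).
-- ===== PORT A =====
-- Python dict.get(k, default) on an association list (first match)
def dGetD {α : Type} (d : List (String × α)) (k : String) (v : α) : α :=
  match d.find? (fun p => p.1 == k) with
  | some p => p.2
  | none => v

def apply_persona_preferences_py (techniques : List String) (persona : List (String × List (String × List (String × List (String × List String))))) (phase_type : String) : List String :=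
  if persona = [] then techniques
  else
    let ttps := dGetD persona "ttps" []
    let kill_chain_prefs := dGetD ttps "kill_chain_preferences" []
    let phase_prefs := dGetD kill_chain_prefs phase_type []
    let preferred_techniques := dGetD phase_prefs "technique_preferences" []
    if preferred_techniques ≠ [] then
      let preferred := techniques.filter (fun t => preferred_techniques.contains t)
      let others := techniques.filter (fun t => ¬ preferred_techniques.contains t)
      preferred ++ others
    else techniques

-- ===== PORT B =====
-- d[k] on an association-list dict: first match, none = KeyError (exact)
def keyGet? {α : Type} (d : List (String × α)) (k : String) : Option α :=
  (d.find? (fun p => p.1 == k)).map Prod.snd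

def apply_persona_preferences_py_alt (techniques : List String) (persona : List (String × List (String × List (String × List (String × List String))))) (phase_type : String) : List String :=
  -- persona["ttps"]["kill_chain_preferences"][phase_type]["technique_preferences"]; none = KeyError
  match (keyGet? persona "ttps").bind (fun ttps =>
        (keyGet? ttps "kill_chain_preferences").bind (fun kcp =>
        (keyGet? kcp phase_type).bind (fun pp =>
        keyGet? pp "technique_preferences"))) with
  | none => techniques
  | some lst =>
    let prefs : PySem.Set String := PySem.Set.ofList lst
    if prefs = [] then techniques
    else
      -- sorted(techniques, key=lambda t: t not in prefs); bool False/True as 0/1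
      PySem.List.sorted techniques (fun t => if PySem.Set.contains prefs t then (0 : Nat) else 1) false

-- ===== PRECONDITION & SPEC =====
def Spec_apply_persona_preferences_py (techniques : List String) (persona : List (String × List (String × List (String × List (String × List String))))) (phase_type : String) (out : List String) : Prop := out = apply_persona_preferences_py_alt techniques persona phase_type
instance (techniques : List String) (persona : List (String × List (String × List (String × List (String × List String))))) (phase_type : String) (out : List String) : Decidable (Spec_apply_persona_preferences_py techniques persona phase_type out) := by unfold Spec_apply_persona_preferences_py; infer_instance

-- ===== CLAIM (what is proved, stated in full; the proofs are below) =====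
def Claim_equal_apply_persona_preferences_py : Prop := ∀ (techniques : List String) (persona : List (String × List (String × List (String × List (String × List String))))) (phase_type : String), Dom_apply_persona_preferences_py techniques persona phase_type → Spec_apply_persona_preferences_py techniques persona phase_type (apply_persona_preferences_py techniques persona phase_type)

-- ===== LEMMAS AND PROOFS =====

theorem insertBy_two_valued {α : Type} (p : α → Bool) (x : α) (A B : List α)
    (hA : ∀ a ∈ A, p a = true) (hB : ∀ b ∈ B, p b = false) :
    PySem.List.insertBy (fun a b => decide ((if p a then (0 : Nat) else 1) < (if p b then (0 : Nat) else 1))) x (A ++ B)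
      = if p x then A ++ x :: B else A ++ B ++ [x] := by
  induction A with
  | nil =>
    induction B with
    | nil => by_cases hx : p x <;> simp [PySem.List.insertBy, hx]
    | cons b bs ihb =>
      have hb := hB b (by simp)
      by_cases hx : p x <;>
        simp_all [PySem.List.insertBy]
  | cons a as iha =>
    have ha := hA a (by simp)
    have := iha (fun a h => hA a (by simp [h]))
    by_cases hx : p x <;> simp_all [PySem.List.insertBy]

theorem foldl_insertBy_two_valued {α : Type} (p : α → Bool) (xs A B : List α)
    (hA : ∀ a ∈ A, p a = true) (hB : ∀ b ∈ B, p b = false) :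
    List.foldl (fun acc x => PySem.List.insertBy (fun a b => decide ((if p a then (0 : Nat) else 1) < (if p b then (0 : Nat) else 1))) x acc) (A ++ B) xs
      = (A ++ xs.filter p) ++ (B ++ xs.filter (fun t => ! p t)) := by
  induction xs generalizing A B with
  | nil => simp
  | cons x xs ih =>
    simp only [List.foldl_cons]
    rw [insertBy_two_valued p x A B hA hB]
    by_cases hx : p x
    · have h1 : A ++ x :: B = (A ++ [x]) ++ B := by simp
      rw [if_pos hx, h1, ih (A ++ [x]) B (by intro a ha; rw [List.mem_append] at ha; rcases ha with h | h; exacts [hA a h, by rw [List.mem_singleton] at h; rw [h]; exact hx]) hB]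
      simp [hx]
    · have hx' : p x = false := by simp_all
      have h1 : A ++ B ++ [x] = A ++ (B ++ [x]) := by simp
      rw [if_neg hx, h1, ih A (B ++ [x]) hA (by intro b hb; rw [List.mem_append] at hb; rcases hb with h | h; exacts [hB b h, by rw [List.mem_singleton] at h; rw [h]; exact hx'])]
      simp [hx']

theorem sorted_two_valued {α : Type} (p : α → Bool) (xs : List α) :
    PySem.List.sorted xs (fun t => if p t then (0 : Nat) else 1) false
      = xs.filter p ++ xs.filter (fun t => ! p t) := by
  have := foldl_insertBy_two_valued p xs [] [] (by simp) (by simp)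
  simpa [PySem.List.sorted] using this

-- A's dict.get(k, default) agrees with get? when the key is present, yields the default when absent
theorem dGetD_eq_get? {α : Type} (d : List (String × α)) (k : String) (v : α) :
    dGetD d k v = (keyGet? d k).getD v := by
  simp [dGetD, keyGet?]
  cases d.find? (fun p => p.1 == k) <;> simp

theorem set_ofList_empty_iff {α : Type} [BEq α] [LawfulBEq α] (l : List α) :
    (PySem.Set.ofList l : List α) = [] ↔ l = [] := by
  constructor
  · intro h
    cases l with
    | nil => rfl
    | cons x xs =>
      exfalso
      have : x ∈ (PySem.Set.ofList (x :: xs) : List α) := by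
        rw [PySem.Set.mem_ofList]; simp
      rw [h] at this; exact List.not_mem_nil this
  · intro h; subst h; rfl

-- ===== VERDICT (by name: the statement is the Claim_ definition above) =====
theorem apply_persona_preferences_py_spec : Claim_equal_apply_persona_preferences_py := by
  intro techniques persona phase_type _
  unfold Spec_apply_persona_preferences_py
  unfold apply_persona_preferences_py apply_persona_preferences_py_alt
  simp only [dGetD_eq_get?]
  by_cases hp : persona = []
  · subst hp; simp [keyGet?]
  · simp only [hp, if_false]
    obtain ⟨o1, h1⟩ : ∃ o, keyGet? persona "ttps" = o := ⟨_, rfl⟩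
    simp only [h1]
    cases o1 with
    | none => simp [keyGet?]
    | some ttps =>
      simp only [Option.getD_some, Option.bind_some]
      obtain ⟨o2, h2⟩ : ∃ o, keyGet? ttps "kill_chain_preferences" = o := ⟨_, rfl⟩
      simp only [h2]
      cases o2 with
      | none => simp [keyGet?]
      | some kcp =>
        simp only [Option.getD_some, Option.bind_some]
        obtain ⟨o3, h3⟩ : ∃ o, keyGet? kcp phase_type = o := ⟨_, rfl⟩
        simp only [h3]
        cases o3 with
        | none => simp [keyGet?]
        | some pp =>
          simp only [Option.getD_some, Option.bind_some]
          obtain ⟨o4, h4⟩ : ∃ o, keyGet? pp "technique_preferences" = o := ⟨_, rfl⟩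
          simp only [h4]
          cases o4 with
          | none => simp
          | some lst =>
            simp only [Option.getD_some]
            by_cases hl : lst = []
            · subst hl; simp
            · rw [if_pos hl]
              have hnil : (PySem.Set.ofList lst : List String) ≠ [] := by
                rw [ne_eq, set_ofList_empty_iff]; exact hl
              simp only [hnil, if_false]
              rw [sorted_two_valued]
              congr 1 <;>
              · apply List.filter_congr
                intro t _
                simp [PySem.Set.contains_eq_listContains, PySem.Set.mem_ofList]
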